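-- pv_equiv track=rewrite | github.com/VitorAlvs/Estudos | Python 3 Programming Specialization - University of Michigan/Python Functions, Files, and Dictionaries/Tests/week 4-1.py | stop_at_z
-- ===== SOURCE A (Python) =====
-- def stop_at_z(x):
--     i = 0
--     list = []
--     while i < len(x):
--         if x[i] == 'z':
--             break
--         list.append(x[i])
--         i += 1
--     return list
-- ===== SOURCE B (Python) =====
-- def stop_at_z(x):
--     if 'z' in x:
--         return list(x[:x.index('z')])
--     return list(x)
-- ===== Notes on version B (the rewrite author's own statement) =====
-- stated objective: simpler
-- what changed: Replaces the index-driven append loop with a locate-then-slice decomposition: find the first 'z' with index() and copy the prefix before it (or the whole list if there is no 'z'); the C-level membership test/index/slice also make it measurably faster.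
import Mathlib
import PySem

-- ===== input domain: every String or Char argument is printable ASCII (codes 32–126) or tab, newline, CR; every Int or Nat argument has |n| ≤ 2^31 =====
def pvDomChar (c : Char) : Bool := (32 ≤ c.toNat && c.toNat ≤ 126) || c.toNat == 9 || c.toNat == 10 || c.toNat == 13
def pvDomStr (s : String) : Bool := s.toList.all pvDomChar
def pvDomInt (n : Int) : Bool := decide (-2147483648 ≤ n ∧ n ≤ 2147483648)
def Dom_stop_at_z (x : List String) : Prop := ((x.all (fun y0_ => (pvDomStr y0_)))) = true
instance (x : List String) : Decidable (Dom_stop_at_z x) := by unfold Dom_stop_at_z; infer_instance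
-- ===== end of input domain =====

-- B replaces A's index-driven append loop by locating the first 'z' and copying the prefix before it (simpler decomposition).

-- ===== PORT A =====
-- the while loop: index i, accumulator list, break on 'z'
def stopAtZLoop (x : List String) (i : Nat) (acc : List String) : List String :=
  if h : i < x.length then
    if x[i] = "z" then acc
    else stopAtZLoop x (i + 1) (acc ++ [x[i]])
  else acc
termination_by x.length - i

def stop_at_z (x : List String) : List String := stopAtZLoop x 0 []

-- ===== PORT B =====
def stop_at_z_alt (x : List String) : List String :=
  if "z" ∈ x then
    match PySem.List.index? x "z" with
    | some k => PySem.List.slice x none (some (k : Int))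
    | none => x
  else x

-- ===== PRECONDITION & SPEC =====
def Spec_stop_at_z (x : List String) (out : List String) : Prop := out = stop_at_z_alt x
instance (x : List String) (out : List String) : Decidable (Spec_stop_at_z x out) := by unfold Spec_stop_at_z; infer_instance

-- ===== CLAIM (what is proved, stated in full; the proofs are below) =====
def Claim_equal_stop_at_z : Prop := ∀ (x : List String), Dom_stop_at_z x → Spec_stop_at_z x (stop_at_z x)

-- ===== LEMMAS AND PROOFS =====
lemma stopAtZLoop_eq (x : List String) :
    ∀ n i acc, x.length - i = n →
      stopAtZLoop x i acc = acc ++ (x.drop i).takeWhile (fun s => s != "z") := by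
  intro n
  induction n with
  | zero =>
      intro i acc h
      rw [stopAtZLoop]
      have hi : ¬ i < x.length := by omega
      rw [List.drop_eq_nil_of_le (show x.length ≤ i by omega)]
      simp [hi]
  | succ n ih =>
      intro i acc h
      have hi : i < x.length := by omega
      rw [stopAtZLoop]
      have hdrop : x.drop i = x[i] :: x.drop (i + 1) := List.drop_eq_getElem_cons hi
      by_cases hz : x[i] = "z"
      · rw [hdrop]
        simp [hi, hz]
      · have hrec := ih (i + 1) (acc ++ [x[i]]) (by omega)
        rw [dif_pos hi, if_neg hz, hrec, hdrop, List.takeWhile_cons]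
        simp [bne_iff_ne, hz]

lemma alt_eq_takeWhile (x : List String) :
    stop_at_z_alt x = x.takeWhile (fun s => s != "z") := by
  unfold stop_at_z_alt
  by_cases hm : "z" ∈ x
  · rcases (PySem.List.index?_isSome_iff x "z").mpr hm |> Option.isSome_iff_exists.mp with ⟨k, hk⟩
    rcases (PySem.List.index?_eq_some_iff x "z" k).mp hk with ⟨pre, suf, hx, hlen, hpre⟩
    rw [hk]
    simp only [hm, if_pos]
    rw [PySem.List.slice_to_natCast, hx, ← hlen, List.take_left,
        List.takeWhile_append]
    have hpw : pre.takeWhile (fun s => s != "z") = pre :=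
      List.takeWhile_eq_self_iff.mpr (by intro a ha; simp [bne_iff_ne]; rintro rfl; exact hpre ha)
    simp [hpw]
  · have : x.takeWhile (fun s => s != "z") = x :=
      List.takeWhile_eq_self_iff.mpr (by intro a ha; simp [bne_iff_ne]; rintro rfl; exact hm ha)
    simp [hm, this]

-- ===== VERDICT (by name: the statement is the Claim_ definition above) =====
theorem stop_at_z_spec : Claim_equal_stop_at_z := by
  intro x _
  unfold Spec_stop_at_z stop_at_z
  rw [stopAtZLoop_eq x (x.length - 0) 0 [] rfl, alt_eq_takeWhile]
  simp
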